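-- pv_equiv track=rewrite | github.com/Homap/ZtoA_Heterozygosity | intergenic.py | intergenicCoord
-- ===== SOURCE A (Python) =====
-- def intergenicCoord(intergenic):
-- 	intergenicDict= {}
-- 	for line in intergenic:
-- 		line = line.strip().split("\t")
-- 		key, value = line[0], line[1:]
-- 		if line[0] in intergenicDict.keys():
-- 			intergenicDict[key].append(value)
-- 		else:
-- 			intergenicDict[key] = [value]
-- 	return intergenicDict
-- ===== SOURCE B (Python) =====
-- def intergenicCoord(intergenic):
--     pairs = []
--     for line in intergenic:
--         parts = line.strip().split("\t")
--         pairs.append((parts[0], parts[1:]))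
--     keys = list(dict.fromkeys(k for k, _ in pairs))
--     return {k: [v for k2, v in pairs if k2 == k] for k in keys}
-- ===== Notes on version B (the rewrite author's own statement) =====
-- stated objective: alternative
-- what changed: A builds the dict incrementally with a per-line membership test and append-or-insert; B instead materialises all (key, values) row pairs, dedups the keys in first-appearance order, and builds each key's value list declaratively by filtering the rows — trading one filter scan per distinct key for the incremental dict updates.
import Mathlib
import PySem

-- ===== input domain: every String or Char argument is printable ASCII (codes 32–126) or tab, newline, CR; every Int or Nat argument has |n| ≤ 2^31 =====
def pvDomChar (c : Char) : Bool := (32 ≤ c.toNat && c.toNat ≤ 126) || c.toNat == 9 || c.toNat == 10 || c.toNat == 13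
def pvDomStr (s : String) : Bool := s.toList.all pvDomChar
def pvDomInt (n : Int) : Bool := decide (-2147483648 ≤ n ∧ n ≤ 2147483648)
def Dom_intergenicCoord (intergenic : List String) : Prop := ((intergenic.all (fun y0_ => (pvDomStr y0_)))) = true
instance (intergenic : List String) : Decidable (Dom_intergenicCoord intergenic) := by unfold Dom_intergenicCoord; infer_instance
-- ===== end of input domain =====

-- B replaces A's incremental dict building by a two-pass grouping (dedup the keys, then
-- gather each key's rows by a filter); same return value, objective: alternative decomposition.

-- ===== PORT A =====
-- A builds the dict line by line: append to the existing list if the key is present, else insert.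
-- split? is never none here ("\t" ≠ ""); its result is nonempty, so headD ""/tail are exactly line[0]/line[1:];
-- d[key].append(value) on a key known to be present is d.modify key [] (· ++ [value]).
def intergenicCoord (intergenic : List String) : List (String × List (List String)) :=
  (intergenic.foldl
    (fun d line =>
      let parts := (PySem.Str.split? (PySem.Str.strip line) "\t").getD []
      let key := parts.headD ""
      let value := parts.tail
      if d.contains key then d.modify key [] (fun vs => vs ++ [value])
      else d.insert key [value])
    PySem.Dict.empty).items

-- ===== PORT B =====
-- one stripped-and-split row of B: (parts[0], parts[1:])
def pvRow (line : String) : String × List String :=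
  let parts := (PySem.Str.split? (PySem.Str.strip line) "\t").getD []
  (parts.headD "", parts.tail)

def intergenicCoord_alt (intergenic : List String) : List (String × List (List String)) :=
  let pairs := intergenic.map pvRow
  let keys := PySem.List.dedup (pairs.map Prod.fst)
  keys.map (fun k => (k, (pairs.filter (fun q => q.1 == k)).map Prod.snd))

-- ===== PRECONDITION & SPEC =====
def Spec_intergenicCoord (intergenic : List String) (out : List (String × List (List String))) : Prop := out = intergenicCoord_alt intergenic
instance (intergenic : List String) (out : List (String × List (List String))) : Decidable (Spec_intergenicCoord intergenic out) := by unfold Spec_intergenicCoord; infer_instance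

-- ===== CLAIM (what is proved, stated in full; the proofs are below) =====
def Claim_equal_intergenicCoord : Prop := ∀ (intergenic : List String), Dom_intergenicCoord intergenic → Spec_intergenicCoord intergenic (intergenicCoord intergenic)

-- ===== LEMMAS AND PROOFS =====

-- A's if/else step is exactly Dict.modify (append to the default [] when the key is fresh)
theorem pv_step_eq_modify (d : PySem.Dict String (List (List String))) (p : String × List String) :
    (if d.contains p.1 then d.modify p.1 [] (fun vs => vs ++ [p.2]) else d.insert p.1 [p.2])
      = d.modify p.1 [] (fun vs => vs ++ [p.2]) := by
  by_cases h : d.contains p.1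
  · simp [h]
  · simp only [Bool.not_eq_true] at h
    simp [h, PySem.Dict.modify, PySem.Dict.getD_of_not_contains _ _ h]

-- A's fold over lines is the modify-fold over B's rows
theorem pv_foldA_eq (intergenic : List String) :
    intergenic.foldl
      (fun d line =>
        let parts := (PySem.Str.split? (PySem.Str.strip line) "\t").getD []
        let key := parts.headD ""
        let value := parts.tail
        if d.contains key then d.modify key [] (fun vs => vs ++ [value])
        else d.insert key [value])
      PySem.Dict.empty
    = (intergenic.map pvRow).foldl
        (fun d p => d.modify p.1 [] (fun vs => vs ++ [p.2])) PySem.Dict.empty := by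
  rw [List.foldl_map]
  refine PySem.List.foldl_congr_mem _ _ _ _ (fun d line _ => ?_)
  simp only [pvRow]
  generalize (PySem.Str.split? (PySem.Str.strip line) "\t").getD [] = parts
  exact pv_step_eq_modify d (parts.headD "", parts.tail)

-- ===== VERDICT (by name: the statement is the Claim_ definition above) =====
theorem intergenicCoord_spec : Claim_equal_intergenicCoord := by
  intro intergenic _
  show intergenicCoord intergenic = intergenicCoord_alt intergenic
  unfold intergenicCoord intergenicCoord_alt
  rw [pv_foldA_eq]
  have hnd : ((intergenic.map pvRow).foldl
      (fun d p => d.modify p.1 [] (fun vs => vs ++ [p.2])) PySem.Dict.empty).keys.Nodup :=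
    PySem.Dict.nodup_keys_foldl_modify_key _ Prod.fst [] (fun _ p vs => vs ++ [p.2]) _ (by simp)
  rw [PySem.Dict.items_eq_map_keys _ hnd []]
  rw [PySem.Dict.keys_foldl_modify_key _ Prod.fst [] (fun _ p vs => vs ++ [p.2])]
  simp [PySem.Dict.getD_foldl_modify_append, PySem.Set.update, PySem.List.dedup_eq_ofList,
    PySem.Set.ofList_eq_foldl]
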